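-- pv_equiv track=rewrite | github.com/WillyMaikowski/cc5509 | digitRecognition/utils.py | mBlackBottomRight
-- ===== SOURCE A (Python) =====
-- BACKGROUND = 240
--
-- FOREGROUND = 0
--
-- MARKED = 1
--
-- def mBlackBottomRight( img ):
--     aux = img.copy()
--     for i in range( len( aux )-2, -1, -1 ):
--         for j in range( len( aux[i] ) ):
--             if i+1>= len(img) or j+1 >= len(img[i]) or aux[i][j] == FOREGROUND:
--                 continue
--             elif aux[i][j] == BACKGROUND and ( aux[i + 1][j + 1] == FOREGROUND or aux[i + 1][j + 1] == MARKED ):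
--                 aux[i][j] = MARKED
--     return aux
-- ===== SOURCE B (Python) =====
-- BACKGROUND = 240
--
-- FOREGROUND = 0
--
-- MARKED = 1
--
-- # Pure per-cell recursive characterisation: a cell gets MARKED iff it is
-- # BACKGROUND (with a right neighbour inside its own row, as A checks) and the
-- # down-right diagonal starting below it reaches FOREGROUND/MARKED through
-- # such background cells.  Note: unlike A, B does not mutate img's rows in
-- # place; only the return value is claimed equivalent.
-- def mBlackBottomRight(img):
--     def seed(i, j):
--         v = img[i][j]
--         return v == FOREGROUND or v == MARKED or markable(i, j)
--
--     def markable(i, j):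
--         return (i + 1 < len(img) and j + 1 < len(img[i])
--                 and img[i][j] == BACKGROUND and seed(i + 1, j + 1))
--
--     return [[MARKED if markable(i, j) else v for j, v in enumerate(row)]
--             for i, row in enumerate(img)]
-- ===== Notes on version B (the rewrite author's own statement) =====
-- stated objective: alternative
-- what changed: A does an in-place bottom-up dynamic-programming sweep mutating a shallow copy; B computes each output cell independently by a pure recursion that follows the down-right diagonal until it hits a foreground/marked seed, building a fresh nested list.
import Mathlib
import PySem

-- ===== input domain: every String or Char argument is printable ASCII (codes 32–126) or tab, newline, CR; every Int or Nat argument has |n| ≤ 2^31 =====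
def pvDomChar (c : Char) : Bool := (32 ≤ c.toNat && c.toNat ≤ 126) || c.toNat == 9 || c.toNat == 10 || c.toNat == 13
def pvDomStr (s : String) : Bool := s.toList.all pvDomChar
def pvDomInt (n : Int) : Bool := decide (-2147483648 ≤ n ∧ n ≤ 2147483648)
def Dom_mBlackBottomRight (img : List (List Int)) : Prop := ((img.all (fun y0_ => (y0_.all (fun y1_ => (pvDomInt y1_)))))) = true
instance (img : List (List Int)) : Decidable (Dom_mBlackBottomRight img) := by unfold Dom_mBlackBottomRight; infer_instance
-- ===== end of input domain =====

-- B replaces A's in-place bottom-up sweep with a pure per-cell recursion down the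
-- diagonal; equivalence is about the RETURN value only (A mutates img's rows in
-- place via the shallow copy, B does not).

-- ===== PORT A =====
-- one body of A's double loop: the `continue` guard, then the marking branch.
-- Python raises IndexError on the read aux[i+1][j+1] when j+1 is out of that
-- row's range; Pre_mBlackBottomRight excludes exactly those inputs, the `getD … 0`
-- is a placeholder there.
def pvStepA (i : Nat) (aux : List (List Int)) (j : Nat) : List (List Int) :=
  if aux.length ≤ i + 1 ∨ (aux.getD i []).length ≤ j + 1 ∨ (aux.getD i []).getD j 0 = 0 then
    aux
  else if (aux.getD i []).getD j 0 = 240 ∧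
          ((aux.getD (i + 1) []).getD (j + 1) 0 = 0 ∨ (aux.getD (i + 1) []).getD (j + 1) 0 = 1) then
    aux.set i ((aux.getD i []).set j 1)
  else
    aux

-- the inner loop: for j in range(len(aux[i]))
def pvRowSweep (aux : List (List Int)) (i : Nat) : List (List Int) :=
  (List.range ((aux.getD i []).length)).foldl (pvStepA i) aux

-- for i in range(len(aux)-2, -1, -1) = the indices len-2, …, 0 = (range (len-1)).reverse
def mBlackBottomRight (img : List (List Int)) : List (List Int) :=
  ((List.range (img.length - 1)).reverse).foldl pvRowSweep img

-- ===== PORT B =====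
-- Source B's mutually recursive seed/markable, fused on a gas parameter that is
-- always img.length - i at a call seed(i, j) (the recursion walks i upward).
def pvSeedB (img : List (List Int)) : Nat → Nat → Nat → Bool
  | 0, i, j =>
      let v := (img.getD i []).getD j 0
      v == 0 || v == 1
  | g + 1, i, j =>
      let v := (img.getD i []).getD j 0
      v == 0 || v == 1 ||
        (decide (i + 1 < img.length) && decide (j + 1 < (img.getD i []).length) &&
         (v == 240) && pvSeedB img g (i + 1) (j + 1))

-- Source B's markable(i, j)
def pvMarkB (img : List (List Int)) (gas i j : Nat) : Bool :=
  decide (i + 1 < img.length) && decide (j + 1 < (img.getD i []).length) &&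
  ((img.getD i []).getD j 0 == 240) && pvSeedB img gas (i + 1) (j + 1)

-- the two enumerate-comprehensions, as mapIdx
def mBlackBottomRight_alt (img : List (List Int)) : List (List Int) :=
  img.mapIdx fun i row =>
    row.mapIdx fun j v => if pvMarkB img (img.length - (i + 1)) i j then 1 else v

-- ===== PRECONDITION & SPEC =====
-- Pre_ excludes exactly the ragged inputs on which A raises IndexError: a
-- BACKGROUND (240) cell with a right neighbour inside its own row whose
-- down-right cell would fall past the end of the next, shorter row.
def Pre_mBlackBottomRight (img : List (List Int)) : Prop :=
  ∀ i < img.length, ∀ j < (img.getD i []).length,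
    (img.getD i []).getD j 0 = 240 → i + 1 < img.length →
    j + 1 < (img.getD i []).length → j + 1 < (img.getD (i + 1) []).length

instance (img : List (List Int)) : Decidable (Pre_mBlackBottomRight img) := by
  unfold Pre_mBlackBottomRight; infer_instance

def pvWitness_mBlackBottomRight : List (List Int) := [[240, 240], [0, 5]]

def Spec_mBlackBottomRight (img : List (List Int)) (out : List (List Int)) : Prop := out = mBlackBottomRight_alt img
instance (img : List (List Int)) (out : List (List Int)) : Decidable (Spec_mBlackBottomRight img out) := by unfold Spec_mBlackBottomRight; infer_instance

-- ===== CLAIM (what is proved, stated in full; the proofs are below) =====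
def Claim_equal_mBlackBottomRight : Prop := ∀ (img : List (List Int)), Dom_mBlackBottomRight img → Pre_mBlackBottomRight img → Spec_mBlackBottomRight img (mBlackBottomRight img)

-- ===== LEMMAS AND PROOFS =====

-- the final value of row i (what B computes for it)
def rowFinal (img : List (List Int)) (i : Nat) : List Int :=
  (img.getD i []).mapIdx fun j v => if pvMarkB img (img.length - (i + 1)) i j then 1 else v

-- row i after the first t inner steps of A's sweep of row i
def rowPartial (img : List (List Int)) (i t : Nat) : List Int :=
  (img.getD i []).mapIdx fun j v =>
    if j < t ∧ pvMarkB img (img.length - (i + 1)) i j = true then 1 else v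

lemma getD_eq_getElem' {α : Type} (l : List α) (n : Nat) (d : α) (h : n < l.length) :
    l.getD n d = l[n] := by
  simp [List.getD_eq_getElem?_getD, List.getElem?_eq_getElem h]

lemma getD_set {α : Type} (l : List α) (n m : Nat) (a d : α) :
    (l.set n a).getD m d = if n = m ∧ n < l.length then a else l.getD m d := by
  simp only [List.getD_eq_getElem?_getD, List.getElem?_set]
  by_cases hnm : n = m
  · subst hnm
    by_cases h2 : n < l.length
    · simp [h2]
    · simp [h2, List.getElem?_eq_none (by omega : l.length ≤ n)]
  · simp [hnm, fun h : n = m ∧ n < l.length => hnm h.1]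

lemma rowPartial_zero (img : List (List Int)) (i : Nat) :
    rowPartial img i 0 = img.getD i [] := by
  apply List.ext_getElem <;> simp [rowPartial]

lemma rowPartial_length (img : List (List Int)) (i t : Nat) :
    (rowPartial img i t).length = (img.getD i []).length := by
  simp [rowPartial]

lemma rowFinal_length (img : List (List Int)) (i : Nat) :
    (rowFinal img i).length = (img.getD i []).length := by
  simp [rowFinal]

lemma rowPartial_top (img : List (List Int)) (i : Nat) :
    rowPartial img i ((img.getD i []).length) = rowFinal img i := by
  apply List.ext_getElem
  · simp [rowPartial, rowFinal]
  · intro k h1 h2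
    simp only [rowPartial, rowFinal, List.getElem_mapIdx] at *
    have hk : k < (img.getD i []).length := by simpa [rowPartial] using h1
    simp only [List.getD_eq_getElem?_getD] at hk
    simp [hk]

lemma rowPartial_getD_self (img : List (List Int)) (i t : Nat)
    (ht : t < (img.getD i []).length) :
    (rowPartial img i t).getD t 0 = (img.getD i []).getD t 0 := by
  rw [getD_eq_getElem' _ _ _ (by simpa [rowPartial_length] using ht),
      getD_eq_getElem' _ _ _ ht]
  simp [rowPartial]

lemma rowPartial_succ_true (img : List (List Int)) (i t : Nat)
    (h : pvMarkB img (img.length - (i + 1)) i t = true) :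
    rowPartial img i (t + 1) = (rowPartial img i t).set t 1 := by
  apply List.ext_getElem
  · simp [rowPartial]
  · intro k h1 h2
    have hk : k < (img.getD i []).length := by simpa [rowPartial] using h1
    by_cases hkt : k = t
    · subst hkt
      simp [rowPartial, List.getElem_set, h, hk]
    · have htk : ¬ t = k := fun hh => hkt hh.symm
      by_cases hk2 : k < t
      · have ha : k ≤ t := by omega
        simp [rowPartial, List.getElem_set, htk, hk2, ha]
      · have ha : ¬ k ≤ t := by omega
        simp [rowPartial, List.getElem_set, htk, hk2, ha]

lemma rowPartial_succ_false (img : List (List Int)) (i t : Nat)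
    (h : pvMarkB img (img.length - (i + 1)) i t = false) :
    rowPartial img i (t + 1) = rowPartial img i t := by
  apply List.ext_getElem
  · simp [rowPartial]
  · intro k h1 h2
    have hk : k < (img.getD i []).length := by simpa [rowPartial] using h1
    by_cases hkt : k = t
    · subst hkt; simp [rowPartial, h]
    · by_cases hk2 : k < t
      · have ha : k ≤ t := by omega
        simp [rowPartial, hk2, ha]
      · have ha : ¬ k ≤ t := by omega
        simp [rowPartial, hk2, ha]

lemma rowFinal_last (img : List (List Int)) (k : Nat) (h : ¬ k + 1 < img.length) :
    rowFinal img k = img.getD k [] := by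
  apply List.ext_getElem
  · simp [rowFinal]
  · intro j h1 h2
    simp [rowFinal, pvMarkB, h]

lemma set_getD_self {α : Type} (l : List α) (n : Nat) (d : α) (h : n < l.length) :
    l.set n (l.getD n d) = l := by
  rw [getD_eq_getElem' _ _ _ h]; exact List.set_getElem_self ..

lemma seedB_succ (img : List (List Int)) (g i j : Nat) :
    pvSeedB img (g + 1) i j =
      (((img.getD i []).getD j 0 == 0) || ((img.getD i []).getD j 0 == 1) ||
        pvMarkB img g i j) := by
  rfl

-- the neighbour test A performs against the FINAL row i+1 is exactly B's seed
lemma neighbour_iff (img : List (List Int)) (i t : Nat)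
    (hi : i + 1 < img.length) (hj : t + 1 < (img.getD (i + 1) []).length) :
    (((rowFinal img (i + 1)).getD (t + 1) 0 = 0 ∨ (rowFinal img (i + 1)).getD (t + 1) 0 = 1)
      ↔ pvSeedB img (img.length - (i + 1)) (i + 1) (t + 1) = true) := by
  have hg : img.length - (i + 1) = (img.length - (i + 2)) + 1 := by omega
  rw [hg, seedB_succ]
  have hget : (rowFinal img (i + 1)).getD (t + 1) 0 =
      if pvMarkB img (img.length - (i + 2)) (i + 1) (t + 1) then 1
      else (img.getD (i + 1) []).getD (t + 1) 0 := by
    rw [getD_eq_getElem' _ _ _ (by simpa [rowFinal_length] using hj),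
        getD_eq_getElem' _ _ _ hj]
    simp [rowFinal]
  rw [hget]
  by_cases hm : pvMarkB img (img.length - (i + 2)) (i + 1) (t + 1) = true
  · simp [hm]
  · simp only [Bool.not_eq_true] at hm
    simp only [hm, if_false, Bool.or_eq_true, beq_iff_eq, Bool.false_eq_true, or_false]

lemma markB_false_len (img : List (List Int)) (g i t : Nat)
    (h : ¬ t + 1 < (img.getD i []).length) : pvMarkB img g i t = false := by
  simp only [List.getD_eq_getElem?_getD] at h
  simp [pvMarkB, h]

lemma markB_false_val (img : List (List Int)) (g i t : Nat)
    (h : (img.getD i []).getD t 0 ≠ 240) : pvMarkB img g i t = false := by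
  simp only [List.getD_eq_getElem?_getD] at h
  simp [pvMarkB, h]

lemma markB_false_seed (img : List (List Int)) (g i t : Nat)
    (h : pvSeedB img g (i + 1) (t + 1) = false) : pvMarkB img g i t = false := by
  simp [pvMarkB, h]

lemma markB_true (img : List (List Int)) (g i t : Nat)
    (h1 : i + 1 < img.length) (h2 : t + 1 < (img.getD i []).length)
    (h3 : (img.getD i []).getD t 0 = 240)
    (h4 : pvSeedB img g (i + 1) (t + 1) = true) : pvMarkB img g i t = true := by
  simp only [List.getD_eq_getElem?_getD] at h2 h3
  simp [pvMarkB, h1, h2, h3, h4]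

-- one inner step of A, on the state whose row i is rowPartial t and row i+1 is final
lemma stepA_correct (img : List (List Int)) (hpre : Pre_mBlackBottomRight img)
    (i t : Nat) (hi : i + 1 < img.length) (ht : t < (img.getD i []).length)
    (s : List (List Int)) (hlen : s.length = img.length)
    (hnext : s.getD (i + 1) [] = rowFinal img (i + 1)) :
    pvStepA i (s.set i (rowPartial img i t)) t = s.set i (rowPartial img i (t + 1)) := by
  have hislt : i < s.length := by omega
  have hrow : (s.set i (rowPartial img i t)).getD i [] = rowPartial img i t := by
    rw [getD_set, if_pos ⟨rfl, hislt⟩]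
  have hrow1 : (s.set i (rowPartial img i t)).getD (i + 1) [] = rowFinal img (i + 1) := by
    rw [getD_set, if_neg (show ¬ (i = i + 1 ∧ i < s.length) by omega)]
    exact hnext
  have hlens' : (s.set i (rowPartial img i t)).length = img.length := by
    simp [hlen]
  unfold pvStepA
  rw [hlens', hrow, hrow1, rowPartial_length, rowPartial_getD_self img i t ht,
      List.set_set]
  by_cases hguard : (img.getD i []).length ≤ t + 1 ∨ (img.getD i []).getD t 0 = 0
  · have hmb : pvMarkB img (img.length - (i + 1)) i t = false := by
      rcases hguard with h | h
      · exact markB_false_len img _ i t (by omega)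
      · exact markB_false_val img _ i t (by rw [h]; decide)
    rw [if_pos (Or.inr hguard), rowPartial_succ_false img i t hmb]
  · push_neg at hguard
    obtain ⟨hb, hv0⟩ := hguard
    rw [if_neg (by push_neg; exact ⟨by omega, by omega, hv0⟩)]
    by_cases hv : (img.getD i []).getD t 0 = 240
    · have hj1 : t + 1 < (img.getD (i + 1) []).length :=
        hpre i (by omega) t ht hv hi hb
      have hiff := neighbour_iff img i t hi hj1
      by_cases hseed : pvSeedB img (img.length - (i + 1)) (i + 1) (t + 1) = true
      · rw [if_pos ⟨hv, hiff.mpr hseed⟩,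
            rowPartial_succ_true img i t (markB_true img _ i t hi hb hv hseed)]
      · rw [if_neg (fun hc => hseed (hiff.mp hc.2)),
            rowPartial_succ_false img i t
              (markB_false_seed img _ i t ((Bool.not_eq_true _).mp hseed))]
    · rw [if_neg (fun hc => hv hc.1),
          rowPartial_succ_false img i t (markB_false_val img _ i t hv)]

-- A's inner loop over row i rewrites that row to its final value
lemma innerA (img : List (List Int)) (hpre : Pre_mBlackBottomRight img)
    (i : Nat) (hi : i + 1 < img.length)
    (s : List (List Int)) (hlen : s.length = img.length)
    (hrow : s.getD i [] = img.getD i [])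
    (hnext : s.getD (i + 1) [] = rowFinal img (i + 1)) :
    pvRowSweep s i = s.set i (rowFinal img i) := by
  unfold pvRowSweep
  have hm : (s.getD i []).length = (img.getD i []).length := by rw [hrow]
  rw [hm]
  have key : ∀ t, t ≤ (img.getD i []).length →
      (List.range t).foldl (pvStepA i) s = s.set i (rowPartial img i t) := by
    intro t
    induction t with
    | zero =>
      intro _
      simp only [List.range_zero, List.foldl_nil]
      rw [rowPartial_zero, ← hrow, set_getD_self s i [] (by omega)]
    | succ t ih =>
      intro hts
      rw [List.range_succ, List.foldl_append, ih (by omega)]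
      simp only [List.foldl_cons, List.foldl_nil]
      exact stepA_correct img hpre i t hi (by omega) s hlen hnext
  rw [key _ le_rfl, rowPartial_top]

-- A's outer loop: processing rows t-1 … 0 finalises every row, given rows ≥ t final
lemma outerA (img : List (List Int)) (hpre : Pre_mBlackBottomRight img) :
    ∀ t, t ≤ img.length - 1 → ∀ s : List (List Int), s.length = img.length →
    (∀ k, t ≤ k → s.getD k [] = rowFinal img k) →
    (∀ k, k < t → s.getD k [] = img.getD k []) →
    (((List.range t).reverse).foldl pvRowSweep s).length = img.length ∧
    ∀ k, (((List.range t).reverse).foldl pvRowSweep s).getD k [] = rowFinal img k := by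
  intro t
  induction t with
  | zero =>
    intro _ s hlen hge _
    exact ⟨by simpa using hlen, fun k => by simpa using hge k (Nat.zero_le k)⟩
  | succ t ih =>
    intro hts s hlen hge hlt
    have hn : t + 1 < img.length := by omega
    have hrev : (List.range (t + 1)).reverse = t :: (List.range t).reverse := by
      rw [List.range_succ, List.reverse_append]; rfl
    rw [hrev, List.foldl_cons,
        innerA img hpre t hn s hlen (hlt t (by omega)) (hge (t + 1) le_rfl)]
    apply ih (by omega)
    · simp [hlen]
    · intro k hk
      rw [getD_set]
      by_cases hkt : t = k
      · subst hkt; simp [hlen, show t < img.length by omega]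
      · simp [hkt]; exact hge k (by omega)
    · intro k hk
      rw [getD_set]
      have hne : ¬ (t = k) := by omega
      simp [hne]; exact hlt k (by omega)

lemma altB_getElem (img : List (List Int)) (k : Nat) (hk : k < img.length) :
    (mBlackBottomRight_alt img)[k]'(by simpa [mBlackBottomRight_alt] using hk)
      = rowFinal img k := by
  simp [mBlackBottomRight_alt, rowFinal, List.getElem?_eq_getElem hk]

-- ===== VERDICT (by name: the statement is the Claim_ definition above) =====
theorem mBlackBottomRight_spec : Claim_equal_mBlackBottomRight := by
  intro img _ hpre
  unfold Spec_mBlackBottomRight mBlackBottomRight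
  have h := outerA img hpre (img.length - 1) le_rfl img rfl
    (fun k hk => (rowFinal_last img k (by omega)).symm) (fun k _ => rfl)
  obtain ⟨hXlen, hXget⟩ := h
  apply List.ext_getElem
  · simpa [mBlackBottomRight_alt] using hXlen
  · intro k h1 h2
    have hk : k < img.length := by omega
    rw [altB_getElem img k hk, ← hXget k, getD_eq_getElem' _ _ _ (by omega)]
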